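-- pv_equiv track=rewrite | github.com/dikoko/practice | 2 Sequences/2-31_same_sum_split.py | samesum_split_dp
-- ===== SOURCE A (Python) =====
-- def samesum_split_dp(nums):
--     if not nums: return
--
--     len_nums = len(nums)
--
--     out_list = []
--
--     sum1 = sum(nums[:1])
--     sum2 = sum(nums[1:])
--     for k in range(1, len_nums):
--         if k != 1:
--             sum1 = sum1 + nums[k-1]
--             sum2 = sum2 - nums[k-1]
--         if sum1 == sum2:
--             out_list.append([nums[:k], nums[k:]])
--
--     return out_list
-- ===== SOURCE B (Python) =====
-- def samesum_split_dp(nums):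
--     if not nums:
--         return None
--     # index the prefix sums: prefix-sum value -> list of split points k (ascending)
--     positions = {}
--     acc = 0
--     for i, x in enumerate(nums[:-1]):
--         acc += x
--         positions.setdefault(acc, []).append(i + 1)
--     total = acc + nums[-1]
--     if total % 2 != 0:
--         return []
--     # a split at k works iff prefix(k) == total - prefix(k), i.e. prefix(k) == total // 2:
--     # one dictionary lookup retrieves all split points at once
--     return [[nums[:k], nums[k:]] for k in positions.get(total // 2, [])]
-- ===== Notes on version B (the rewrite author's own statement) =====
-- stated objective: alternative
-- what changed: Instead of comparing running left/right sums at every split point, B builds a hash index mapping each prefix-sum value to its list of split points in one pass, then answers with a parity check on the total and a single dictionary lookup at total//2, so the per-split comparison scan disappears.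
import Mathlib
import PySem

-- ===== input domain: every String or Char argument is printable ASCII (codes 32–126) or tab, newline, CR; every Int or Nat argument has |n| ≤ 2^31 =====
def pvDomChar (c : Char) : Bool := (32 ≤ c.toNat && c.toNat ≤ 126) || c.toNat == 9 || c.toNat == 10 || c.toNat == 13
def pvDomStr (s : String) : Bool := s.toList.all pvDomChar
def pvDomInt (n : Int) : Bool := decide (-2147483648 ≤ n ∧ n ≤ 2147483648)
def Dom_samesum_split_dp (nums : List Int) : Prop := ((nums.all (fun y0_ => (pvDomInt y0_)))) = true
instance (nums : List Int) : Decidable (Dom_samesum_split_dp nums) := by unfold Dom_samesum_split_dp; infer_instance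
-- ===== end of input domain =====

-- B replaces A's per-split running-sum comparisons by a dictionary indexing every
-- prefix-sum value to its split points, answered with a parity test and one lookup
-- at total // 2; an alternative decomposition of the same overall cost.

-- ===== PORT A =====
def samesum_split_dp (nums : List Int) : Option (List (List (List Int))) :=
  if nums = [] then none else
    let len_nums : Int := nums.length
    let init : Int × Int × List (List (List Int)) :=
      ((PySem.List.slice nums none (some 1)).sum, (PySem.List.slice nums (some 1) none).sum, [])
    let final := (PySem.List.pyRange 1 len_nums 1).foldl
      (fun st k =>
        let s1 := if k ≠ 1 then st.1 + PySem.List.pyGetD nums (k - 1) 0 else st.1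
        let s2 := if k ≠ 1 then st.2.1 - PySem.List.pyGetD nums (k - 1) 0 else st.2.1
        let out := if s1 = s2 then
            st.2.2 ++ [[PySem.List.slice nums none (some k), PySem.List.slice nums (some k) none]]
          else st.2.2
        (s1, s2, out)) init
    some final.2.2

-- ===== PORT B =====
def samesum_split_dp_alt (nums : List Int) : Option (List (List (List Int))) :=
  if nums = [] then none else
    -- positions = {}; acc = 0
    -- for i, x in enumerate(nums[:-1]): acc += x; positions.setdefault(acc, []).append(i + 1)
    let st := (PySem.List.enumerate (PySem.List.slice nums none (some (-1)))).foldl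
      (fun (st : Int × PySem.Dict Int (List Int)) p =>
        let acc := st.1 + p.2
        (acc, st.2.modify acc [] (fun l => l ++ [p.1 + 1])))
      (0, PySem.Dict.empty)
    let total := st.1 + PySem.List.pyGetD nums (-1) 0
    if PySem.Int.mod total 2 ≠ 0 then some []
    else some ((st.2.getD (PySem.Int.floordiv total 2) []).map
      (fun k => [PySem.List.slice nums none (some k), PySem.List.slice nums (some k) none]))

-- ===== PRECONDITION & SPEC =====
def Spec_samesum_split_dp (nums : List Int) (out : Option (List (List (List Int)))) : Prop := out = samesum_split_dp_alt nums
instance (nums : List Int) (out : Option (List (List (List Int)))) : Decidable (Spec_samesum_split_dp nums out) := by unfold Spec_samesum_split_dp; infer_instance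

-- ===== CLAIM (what is proved, stated in full; the proofs are below) =====
def Claim_equal_samesum_split_dp : Prop := ∀ (nums : List Int), Dom_samesum_split_dp nums → Spec_samesum_split_dp nums (samesum_split_dp nums)

-- ===== LEMMAS AND PROOFS =====

-- the split entry both ports build at index k, and A's collected output after indices 1..j
def pvBuild (nums : List Int) (k : Int) : List (List Int) :=
  [PySem.List.slice nums none (some k), PySem.List.slice nums (some k) none]

def pvOuts (nums : List Int) (j : Nat) : List (List (List Int)) :=
  ((PySem.List.pyRange 1 ((j : Int) + 1) 1).filter
      (fun k => decide (2 * (nums.take k.toNat).sum = nums.sum))).map (pvBuild nums)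

lemma pvOuts_succ (nums : List Int) (j : Nat) :
    pvOuts nums (j + 1) = pvOuts nums j ++
      (if 2 * (nums.take (j + 1)).sum = nums.sum then [pvBuild nums ((j : Int) + 1)] else []) := by
  unfold pvOuts
  have h : PySem.List.pyRange 1 ((((j : Nat) + 1 : Nat) : Int) + 1) 1
      = PySem.List.pyRange 1 ((j : Int) + 1) 1 ++ [(j : Int) + 1] := by
    have := PySem.List.pyRange_one_succ_right (a := 1) (b := (j : Int) + 1) (by omega)
    push_cast at this ⊢
    exact this
  rw [h, List.filter_append, List.map_append]
  congr 1
  simp only [List.filter_cons, List.filter_nil]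
  have ht : ((j : Int) + 1).toNat = j + 1 := by omega
  rw [ht]
  split_ifs <;> simp_all

-- A's loop invariant: after processing indices 1..j the state carries the two running
-- sums at split j (the k == 1 iteration leaves the initial sums untouched) and the
-- matches collected so far
lemma pv_loopA (nums : List Int) (j : Nat) (hj : j < nums.length) :
    (PySem.List.pyRange 1 ((j : Int) + 1) 1).foldl
      (fun (st : Int × Int × List (List (List Int))) k =>
        let s1 := if k ≠ 1 then st.1 + PySem.List.pyGetD nums (k - 1) 0 else st.1
        let s2 := if k ≠ 1 then st.2.1 - PySem.List.pyGetD nums (k - 1) 0 else st.2.1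
        let out := if s1 = s2 then
            st.2.2 ++ [[PySem.List.slice nums none (some k), PySem.List.slice nums (some k) none]]
          else st.2.2
        (s1, s2, out))
      ((PySem.List.slice nums none (some 1)).sum, (PySem.List.slice nums (some 1) none).sum, [])
    = ((nums.take (max 1 j)).sum, (nums.drop (max 1 j)).sum, pvOuts nums j) := by
  induction j with
  | zero =>
    rw [PySem.List.pyRange_one_eq_nil (by norm_num)]
    simp [pvOuts, PySem.List.pyRange_one_eq_nil, PySem.List.slice_to (nums) (b := 1) (by norm_num),
      PySem.List.slice_from (nums) (a := 1) (by norm_num)]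
  | succ j ih =>
    have hj' : j < nums.length := by omega
    have hrange : PySem.List.pyRange 1 ((((j : Nat) + 1 : Nat) : Int) + 1) 1
        = PySem.List.pyRange 1 ((j : Int) + 1) 1 ++ [(j : Int) + 1] := by
      have := PySem.List.pyRange_one_succ_right (a := 1) (b := (j : Int) + 1) (by omega)
      push_cast at this ⊢
      exact this
    rw [hrange, List.foldl_append, ih hj']
    rw [pvOuts_succ]
    have hsum := List.sum_take_add_sum_drop nums (j + 1)
    have hslice1 : PySem.List.slice nums none (some ((j : Int) + 1)) = nums.take (j + 1) := by
      rw [PySem.List.slice_to nums (by omega)]; congr 1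
    have hslice2 : PySem.List.slice nums (some ((j : Int) + 1)) none = nums.drop (j + 1) := by
      rw [PySem.List.slice_from nums (by omega)]; congr 1
    by_cases hj0 : j = 0
    · subst hj0
      simp only [List.foldl_cons, List.foldl_nil]
      norm_num
      unfold pvBuild
      rw [show ((0 : Nat) : Int) + 1 = (1 : Int) by norm_num] at hslice1 hslice2
      rw [hslice1, hslice2]
      try simp only [List.drop_one] at hsum ⊢
      try simp only [List.drop_one] at hsum
      norm_num at hsum
      split_ifs with h1 h2 h2
      · rfl
      · exact absurd (by linarith) h2
      · exact absurd (by linarith) h1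
      · simp
    · have hne : ¬ ((j : Int) + 1 = 1) := by omega
      simp only [List.foldl_cons, List.foldl_nil]
      simp only [hne, ne_eq, not_false_eq_true, if_pos]
      have hget : PySem.List.pyGetD nums ((j : Int) + 1 - 1) 0 = nums[j] := by
        rw [show (j : Int) + 1 - 1 = (j : Int) by ring]
        rw [PySem.List.pyGetD_eq_getElem nums 0 (by omega) (by exact_mod_cast hj')]
        congr 1
      have hmax : max 1 j = j := by omega
      have hmax' : max 1 (j + 1) = j + 1 := by omega
      have hts := List.sum_take_succ nums j hj'
      have htake : (nums.take j).sum + nums[j] = (nums.take (j + 1)).sum := by linarith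
      have hdrop : (nums.drop j).sum - nums[j] = (nums.drop (j + 1)).sum := by
        have h1 := List.sum_take_add_sum_drop nums j
        linarith
      rw [hget, hmax, hmax', htake, hdrop]
      simp only [Prod.mk.injEq, true_and]
      unfold pvBuild
      rw [hslice1, hslice2]
      split_ifs with h1 h2 h2
      · rfl
      · exact absurd (by linarith) h2
      · exact absurd (by linarith) h1
      · simp

-- B-side: the fold step and the ascending index list a dict entry holds
def pvStep (st : Int × PySem.Dict Int (List Int)) (p : Int × Int) :
    Int × PySem.Dict Int (List Int) :=
  let acc := st.1 + p.2
  (acc, st.2.modify acc [] (fun l => l ++ [p.1 + 1]))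

def pvIdx (body : List Int) (s a v : Int) : List Int :=
  (List.range body.length).filterMap
    (fun i => if a + (body.take (i + 1)).sum = v then some (s + (i : Int) + 1) else none)

lemma pvIdx_cons (x : Int) (body : List Int) (s a v : Int) :
    pvIdx (x :: body) s a v
      = (if a + x = v then [s + 1] else []) ++ pvIdx body (s + 1) (a + x) v := by
  unfold pvIdx
  rw [List.length_cons, List.range_succ_eq_map, List.filterMap_cons, List.filterMap_map]
  simp only [List.take_succ_cons, List.take_zero, List.sum_cons, List.sum_nil, add_zero,
    Function.comp]
  by_cases hv : a + x = v
  · simp only [if_pos hv, List.singleton_append]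
    congr 1
    · simp
    · apply List.filterMap_congr
      intro i _
      by_cases hc : a + x + (body.take (i + 1)).sum = v
      · rw [if_pos (by linarith), if_pos hc]
        congr 1
        push_cast
        ring
      · rw [if_neg (fun hh => hc (by linarith)), if_neg hc]
  · simp only [if_neg hv, List.nil_append]
    apply List.filterMap_congr
    intro i _
    by_cases hc : a + x + (body.take (i + 1)).sum = v
    · rw [if_pos (by linarith), if_pos hc]
      congr 1
      push_cast
      ring
    · rw [if_neg (fun hh => hc (by linarith)), if_neg hc]

-- B's loop invariant: folding pvStep over enumerate body s from (a, d) yields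
-- acc = a + sum body and, at every key v, the old entry of d followed by pvIdx body s a v
lemma pv_loopB : ∀ (body : List Int) (s a : Int) (d : PySem.Dict Int (List Int)),
    ((PySem.List.enumerate body s).foldl pvStep (a, d)).1 = a + body.sum
  ∧ ∀ v, (((PySem.List.enumerate body s).foldl pvStep (a, d)).2).getD v []
      = d.getD v [] ++ pvIdx body s a v := by
  intro body
  induction body with
  | nil => intro s a d; simp [PySem.List.enumerate_nil, pvIdx]
  | cons x body ih =>
    intro s a d
    rw [PySem.List.enumerate_cons]
    simp only [List.foldl_cons]
    have hstep : pvStep (a, d) (s, x) = (a + x, d.modify (a + x) [] (fun l => l ++ [s + 1])) := rfl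
    rw [hstep]
    obtain ⟨ih1, ih2⟩ := ih (s + 1) (a + x) (d.modify (a + x) [] (fun l => l ++ [s + 1]))
    refine ⟨by rw [ih1, List.sum_cons]; ring, ?_⟩
    intro v
    rw [ih2 v, pvIdx_cons]
    by_cases hv : a + x = v
    · rw [if_pos hv, ← hv, PySem.Dict.getD_modify_self]
      simp
    · rw [if_neg hv, PySem.Dict.getD_modify_of_ne]
      · simp
      · exact fun h => hv h.symm

-- filterMap of an if-some-none is map over filter
lemma pv_filterMap_if {a b : Type} (l : List a) (c : a -> Prop) [DecidablePred c] (g : a -> b) :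
    l.filterMap (fun i => if c i then some (g i) else none)
      = (l.filter (fun i => decide (c i))).map g := by
  induction l with
  | nil => rfl
  | cons x l ih =>
    rw [List.filterMap_cons, List.filter_cons]
    by_cases h : c x <;> simp [h, ih]

-- pyRange 1 (m+1) as a map over List.range
lemma pv_pyRange_map (m : Nat) :
    PySem.List.pyRange 1 ((m : Int) + 1) 1
      = (List.range m).map (fun i : Nat => ((i : Int) + 1)) := by
  induction m with
  | zero => rw [PySem.List.pyRange_one_eq_nil (by norm_num)]; simp
  | succ m ih =>
    have h := PySem.List.pyRange_one_succ_right (a := 1) (b := (m : Int) + 1) (by omega)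
    have hc : ((m + 1 : Nat) : Int) + 1 = ((m : Int) + 1) + 1 := by push_cast; ring
    rw [hc, h, ih, List.range_succ, List.map_append]
    simp

-- ===== VERDICT (by name: the statement is the Claim_ definition above) =====
theorem samesum_split_dp_spec : Claim_equal_samesum_split_dp := by
  intro nums _
  unfold Spec_samesum_split_dp samesum_split_dp samesum_split_dp_alt
  by_cases h : nums = []
  · simp [h]
  · simp only [h, if_false]
    have hlen : 1 ≤ nums.length := List.length_pos_iff.mpr h
    have hcast : (((nums.length - 1 : Nat) : Int) + 1) = (nums.length : Int) := by
      push_cast [hlen]; omega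
    have hloop := pv_loopA nums (nums.length - 1) (by omega)
    rw [hcast] at hloop
    rw [hloop]
    have hbody : PySem.List.slice nums none (some (-1)) = nums.dropLast :=
      PySem.List.slice_to_neg_one nums
    have hstep_eq : (fun (st : Int × PySem.Dict Int (List Int)) p =>
        let acc := st.1 + p.2
        (acc, st.2.modify acc [] (fun l => l ++ [p.1 + 1]))) = pvStep := rfl
    rw [hbody, hstep_eq]
    obtain ⟨hf1, hf2⟩ := pv_loopB nums.dropLast 0 0 PySem.Dict.empty
    rw [hf1]
    have hlast : PySem.List.pyGetD nums (-1) 0 = nums.getLast h := by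
      apply PySem.List.pyGetD_neg_one
    have htotal : (0 : Int) + nums.dropLast.sum + PySem.List.pyGetD nums (-1) 0 = nums.sum := by
      rw [hlast]
      conv_rhs => rw [← List.dropLast_concat_getLast h]
      rw [List.sum_append]
      simp
    rw [htotal]
    by_cases hpar : PySem.Int.mod nums.sum 2 ≠ 0
    · rw [if_pos hpar]
      have hmod : nums.sum % 2 ≠ 0 := by
        rwa [PySem.Int.mod_eq_emod_of_pos (by norm_num)] at hpar
      congr 1
      unfold pvOuts
      rw [List.map_eq_nil_iff, List.filter_eq_nil_iff]
      intro k _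
      simp only [decide_eq_true_eq]
      intro hk
      omega
    · rw [if_neg hpar]
      have hmod : nums.sum % 2 = 0 := by
        have := hpar
        rwa [PySem.Int.mod_eq_emod_of_pos (by norm_num), not_not] at this
      have hq : PySem.Int.floordiv nums.sum 2 = nums.sum / 2 :=
        PySem.Int.floordiv_eq_ediv_of_pos (by norm_num)
      congr 1
      rw [hf2, hq, PySem.Dict.getD_empty, List.nil_append]
      unfold pvOuts pvIdx
      rw [pv_filterMap_if, List.map_map]
      dsimp only
      rw [pv_pyRange_map, List.filter_map, List.map_map]
      have hdl : nums.dropLast.length = nums.length - 1 := by simp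
      rw [hdl]
      simp only [zero_add]
      congr 1
      apply List.filter_congr
      intro i hi
      rw [List.mem_range] at hi
      have htk : nums.dropLast.take (i + 1) = nums.take (i + 1) := by
        rw [List.dropLast_eq_take, List.take_take]
        congr 1
        omega
      have ht : ((i : Int) + 1).toNat = i + 1 := by omega
      simp only [Function.comp_apply]
      rw [ht, htk, decide_eq_decide]
      constructor <;> intro hh <;> omega
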